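-- pv_equiv track=rewrite | github.com/armageden/learning_path | python/dic3.py | is_james_bond
-- ===== SOURCE A (Python) =====
-- def is_james_bond(int_list):
--     num=7
--
--     for i in range(len(int_list)):
--         if int_list[i]==7:
--             lim=i
--             count=0
--             for j in range(lim):
--
--                 if int_list[j]==0:
--                     count+=1
--             if count>1:
--                 return True
--             else:
--                 return False
-- ===== SOURCE B (Python) =====
-- def is_james_bond(int_list):
--     count = 0
--     for x in int_list:
--         if x == 7:
--             return count > 1
--         if x == 0:
--             count += 1
--     return None
-- ===== Notes on version B (the rewrite author's own statement) =====
-- stated objective: simpler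
-- what changed: Single forward pass over the elements with a running zero counter, deciding at the first 7, instead of locating the 7 by index and re-scanning the prefix with a second index loop to count zeros.
import Mathlib
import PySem

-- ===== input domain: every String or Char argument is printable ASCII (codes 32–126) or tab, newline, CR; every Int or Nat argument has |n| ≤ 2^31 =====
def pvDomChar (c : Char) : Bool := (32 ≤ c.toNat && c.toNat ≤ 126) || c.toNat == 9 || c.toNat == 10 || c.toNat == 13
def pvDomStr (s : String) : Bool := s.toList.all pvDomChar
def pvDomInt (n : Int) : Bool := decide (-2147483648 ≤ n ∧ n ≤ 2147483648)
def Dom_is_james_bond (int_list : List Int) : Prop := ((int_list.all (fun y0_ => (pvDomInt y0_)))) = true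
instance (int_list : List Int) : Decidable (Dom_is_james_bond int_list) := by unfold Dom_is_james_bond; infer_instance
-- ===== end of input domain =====

-- B: single pass with a running zero counter (no prefix re-scan); faithful to A's return value including None when no 7 occurs.
-- ===== PORT A =====
-- inner loop: count = 0; for j in range(lim): if int_list[j]==0: count += 1
def isjbCount (xs : List Int) (lim : Nat) : Int :=
  (List.range lim).foldl (fun count j => if xs.getD j 0 = 0 then count + 1 else count) 0

-- outer loop: for i in range(len(int_list)): if int_list[i]==7: … return …  (fall-through → none)
def isjbLoop (xs : List Int) (i : Nat) : Option Bool :=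
  if h : i < xs.length then
    if xs.getD i 0 = 7 then some (decide (isjbCount xs i > 1))
    else isjbLoop xs (i + 1)
  else none
termination_by xs.length - i

def is_james_bond (int_list : List Int) : Option Bool := isjbLoop int_list 0

-- ===== PORT B =====
def isjbGo (count : Int) : List Int → Option Bool
  | [] => none
  | x :: t => if x = 7 then some (decide (count > 1))
              else isjbGo (if x = 0 then count + 1 else count) t

def is_james_bond_alt (int_list : List Int) : Option Bool := isjbGo 0 int_list

-- ===== PRECONDITION & SPEC =====
def Spec_is_james_bond (int_list : List Int) (out : Option Bool) : Prop := out = is_james_bond_alt int_list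
instance (int_list : List Int) (out : Option Bool) : Decidable (Spec_is_james_bond int_list out) := by unfold Spec_is_james_bond; infer_instance

-- ===== CLAIM (what is proved, stated in full; the proofs are below) =====
def Claim_equal_is_james_bond : Prop := ∀ (int_list : List Int), Dom_is_james_bond int_list → Spec_is_james_bond int_list (is_james_bond int_list)

-- ===== LEMMAS AND PROOFS =====

-- ===== VERDICT (by name: the statement is the Claim_ definition above) =====
lemma isjbCount_succ (xs : List Int) (i : Nat) :
    isjbCount xs (i + 1) = if xs.getD i 0 = 0 then isjbCount xs i + 1 else isjbCount xs i := by
  simp [isjbCount, List.range_succ]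

lemma isjb_key (xs : List Int) (k i : Nat) (hk : xs.length - i ≤ k) :
    isjbLoop xs i = isjbGo (isjbCount xs i) (xs.drop i) := by
  induction k generalizing i with
  | zero =>
    have h : ¬ i < xs.length := by omega
    rw [isjbLoop]
    simp [h, List.drop_eq_nil_of_le (by omega : xs.length ≤ i), isjbGo]
  | succ k ih =>
    by_cases h : i < xs.length
    · rw [isjbLoop]
      rw [List.drop_eq_getElem_cons h]
      have hg : xs.getD i 0 = xs[i] := List.getD_eq_getElem xs 0 h
      simp only [h, dif_pos, isjbGo, hg]
      by_cases h7 : xs[i] = 7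
      · simp [h7]
      · rw [if_neg h7, if_neg h7]
        rw [ih (i + 1) (by omega)]
        congr 1
        rw [isjbCount_succ, hg]
    · rw [isjbLoop]
      simp [h, List.drop_eq_nil_of_le (by omega : xs.length ≤ i), isjbGo]

theorem is_james_bond_spec : Claim_equal_is_james_bond := by
  intro xs _
  unfold Spec_is_james_bond is_james_bond is_james_bond_alt
  have := isjb_key xs xs.length 0 (by omega)
  simpa [isjbCount] using this
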